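-- pv_equiv track=rewrite | github.com/blaine-t-bush/advent-of-code | 2016/day7.py | supports_ssl
-- ===== SOURCE A (Python) =====
-- def is_length_3_unique_palindrome(string: str):
--     if len(string) != 3:
--         raise ValueError(f"Expected string of length 4, received {string}")
--     return string[0] == string[2] and string[0] != string[1]
--
-- def has_aba(string: str):
--     if len(string) == 3:
--         return is_length_3_unique_palindrome(string), [string]
--     elif len(string) > 3:
--         abas = []
--         for start_index in range(0, len(string) - 2):
--             substring = string[start_index : start_index + 3]
--             if is_length_3_unique_palindrome(substring):
--                 abas.append(substring)
--         if len(abas) > 0: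
--             return True, abas
--
--     return False, None
--
-- def supports_ssl(input):
--     hypernet_sequences, supernet_sequences = parse_input(input)
--     for supernet_sequence in supernet_sequences:
--         has, abas = has_aba(supernet_sequence)
--         if has:
--             for aba in abas:
--                 bab = aba[1] + aba[0] + aba[1]
--                 for hypernet_sequence in hypernet_sequences:
--                     if bab in hypernet_sequence:
--                         return True
--
--     return False
--
-- def parse_input(input):
--     # Find hypernet sequences (strings between square brackets).
--     index_start = -1
--     bracket_pairs = []
--     while True:
--         index_start = input.find("[", index_start + 1)
--         if index_start == -1:
--             break
--         index_end = input.find("]", index_start + 1)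
--
--         bracket_pairs.append((index_start, index_end))
--
--     hypernet_sequences = []
--     for bracket_pair in bracket_pairs:
--         hypernet_sequences.append(
--             input[bracket_pair[0] + 1 : bracket_pair[1]].rstrip("\n")
--         )
--
--     # Find non-hypernet sequences
--     supernet_sequences = []
--     for index, bracket_pair in enumerate(bracket_pairs):
--         if index == 0:
--             supernet_sequences.append(input[0 : bracket_pair[0]].rstrip("\n"))
--         else:
--             supernet_sequences.append(
--                 input[bracket_pairs[index - 1][1] + 1 : bracket_pairs[index][0]].rstrip(
--                     "\n"
--                 )
--             )
--
--         if index == len(bracket_pairs) - 1: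
--             supernet_sequences.append(input[bracket_pair[1] + 1 :].rstrip("\n"))
--
--     return hypernet_sequences, supernet_sequences
-- ===== SOURCE B (Python) =====
-- def parse_input(input):
--     # Find hypernet sequences (strings between square brackets).
--     index_start = -1
--     bracket_pairs = []
--     while True:
--         index_start = input.find("[", index_start + 1)
--         if index_start == -1:
--             break
--         index_end = input.find("]", index_start + 1)
--
--         bracket_pairs.append((index_start, index_end))
--
--     hypernet_sequences = []
--     for bracket_pair in bracket_pairs:
--         hypernet_sequences.append(
--             input[bracket_pair[0] + 1 : bracket_pair[1]].rstrip("\n")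
--         )
--
--     # Find non-hypernet sequences
--     supernet_sequences = []
--     for index, bracket_pair in enumerate(bracket_pairs):
--         if index == 0:
--             supernet_sequences.append(input[0 : bracket_pair[0]].rstrip("\n"))
--         else:
--             supernet_sequences.append(
--                 input[bracket_pairs[index - 1][1] + 1 : bracket_pairs[index][0]].rstrip(
--                     "\n"
--                 )
--             )
--
--         if index == len(bracket_pairs) - 1:
--             supernet_sequences.append(input[bracket_pair[1] + 1 :].rstrip("\n"))
--
--     return hypernet_sequences, supernet_sequences
--
--
-- def supports_ssl(input):
--     # Build an index of every length-3 window occurring in any hypernet sequence,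
--     # then make a single pass over the supernet windows testing ABA inline.
--     hypernet_sequences, supernet_sequences = parse_input(input)
--
--     hypernet_triples = set()
--     for h in hypernet_sequences:
--         for i in range(len(h) - 2):
--             hypernet_triples.add(h[i : i + 3])
--
--     for s in supernet_sequences:
--         for i in range(len(s) - 2):
--             if s[i] == s[i + 2] and s[i] != s[i + 1]:
--                 if s[i + 1] + s[i] + s[i + 1] in hypernet_triples:
--                     return True
--
--     return False
-- ===== Notes on version B (the rewrite author's own statement) =====
-- stated objective: alternative
-- what changed: supports_ssl now first builds a set of every length-3 window of the hypernet sequences, then makes a single pass over the supernet windows testing ABA inline and looking the BAB up in that set, instead of collecting ABAs per supernet and running a nested substring search over all hypernets for each; parse_input is unchanged.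
import Mathlib
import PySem

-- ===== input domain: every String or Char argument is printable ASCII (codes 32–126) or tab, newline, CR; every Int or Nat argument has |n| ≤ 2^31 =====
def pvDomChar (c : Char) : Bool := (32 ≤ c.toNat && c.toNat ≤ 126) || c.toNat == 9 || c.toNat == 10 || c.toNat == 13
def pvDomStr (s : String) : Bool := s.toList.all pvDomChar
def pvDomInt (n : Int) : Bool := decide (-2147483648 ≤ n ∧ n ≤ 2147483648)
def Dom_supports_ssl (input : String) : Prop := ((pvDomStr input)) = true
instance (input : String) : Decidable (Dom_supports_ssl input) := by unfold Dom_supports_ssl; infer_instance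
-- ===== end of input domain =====

-- B replaces A's per-ABA nested substring search over the hypernets by one prebuilt set of all
-- hypernet length-3 windows, then a single pass over the supernet windows (objective: alternative).

-- ===== PORT A =====
-- shared helper: literal port of parse_input (identical source code in Source A and Source B)
-- exact port of str.rstrip("\n"): remove trailing newline characters
def rstripNl (s : List Char) : List Char := (s.reverse.dropWhile (· == '\n')).reverse

-- the while-loop of parse_input: repeated input.find("[", index_start + 1); k is the next search
-- start (index_start + 1, always ≥ 0 and ≤ len, so the outer guard is a pure totality guard)
def findBrackets (s : List Char) (k : Nat) : List (Int × Int) :=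
  if hk : k ≤ s.length then
    let j := PySem.Chars.findFrom s ['['] (k : Int) none
    if hj : j = -1 then []
    else
      let e := PySem.Chars.findFrom s [']'] (j + 1) none
      (j, e) :: findBrackets s (j.toNat + 1)
  else []
termination_by s.length + 1 - k
decreasing_by
  have hs := PySem.Chars.findFrom_natCast_spec s ['['] k hk hj
  omega

def parse_input (input : List Char) : List (List Char) × List (List Char) :=
  let bracket_pairs := findBrackets input 0
  let hypernet_sequences := bracket_pairs.map
    (fun bp => rstripNl (PySem.List.slice input (some (bp.1 + 1)) (some bp.2)))
  let supernet_sequences := (PySem.List.enumerate bracket_pairs).foldl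
    (fun acc ib =>
      let acc := if ib.1 == 0 then
          acc ++ [rstripNl (PySem.List.slice input (some 0) (some ib.2.1))]
        else
          acc ++ [rstripNl (PySem.List.slice input
            (some ((PySem.List.pyGetD bracket_pairs (ib.1 - 1) (0, 0)).2 + 1)) (some ib.2.1))]
      if ib.1 == (bracket_pairs.length : Int) - 1 then
        acc ++ [rstripNl (PySem.List.slice input (some (ib.2.2 + 1)) none)]
      else acc) []
  (hypernet_sequences, supernet_sequences)

-- Python raises ValueError when len ≠ 3; every call site passes a length-3 window, so the raise
-- path is unreachable from supports_ssl and not modelled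
def is_length_3_unique_palindrome (s : List Char) : Bool :=
  s[0]? == s[2]? && !(s[0]? == s[1]?)

def has_aba (s : List Char) : Bool × Option (List (List Char)) :=
  if s.length = 3 then (is_length_3_unique_palindrome s, some [s])
  else if 3 < s.length then
    let abas := (List.range (s.length - 2)).foldl
      (fun acc (start_index : Nat) =>
        let substring := PySem.List.slice s (some (start_index : Int)) (some ((start_index : Int) + 3))
        if is_length_3_unique_palindrome substring then acc ++ [substring] else acc) []
    if 0 < abas.length then (true, some abas) else (false, none)
  else (false, none)

-- the for-loops of supports_ssl with their early 'return True'
-- (aba is always a length-3 window, so the getD defaults are never used)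
def ssl_loopA (hypernet_sequences : List (List Char)) : List (List Char) → Bool
  | [] => false
  | supernet_sequence :: rest =>
    let p := has_aba supernet_sequence
    if p.1 &&
        (p.2.getD []).any (fun aba =>
          let bab := [aba.getD 1 ' ', aba.getD 0 ' ', aba.getD 1 ' ']
          hypernet_sequences.any (fun h => PySem.Chars.isIn bab h))
    then true
    else ssl_loopA hypernet_sequences rest

def supports_ssl (input : String) : Bool :=
  let ps := parse_input input.toList
  ssl_loopA ps.1 ps.2

-- ===== PORT B =====
-- populate: the nested loop 'for h in hypernets: for i in range(len(h)-2): triples.add(h[i:i+3])'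
def hyperTriples (hypernet_sequences : List (List Char)) : PySem.Set (List Char) :=
  hypernet_sequences.foldl
    (fun acc h => (List.range (h.length - 2)).foldl
      (fun acc2 (i : Nat) => PySem.Set.add acc2 (PySem.List.slice h (some (i : Int)) (some ((i : Int) + 3))))
      acc)
    PySem.Set.empty

-- check: one pass over the supernet windows, ABA tested inline, BAB looked up in the set
def supports_ssl_alt (input : String) : Bool :=
  let ps := parse_input input.toList
  let triples := hyperTriples ps.1
  ps.2.any (fun s =>
    (List.range (s.length - 2)).any (fun i =>
      s.getD i ' ' == s.getD (i + 2) ' ' && !(s.getD i ' ' == s.getD (i + 1) ' ') &&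
      PySem.Set.contains triples [s.getD (i + 1) ' ', s.getD i ' ', s.getD (i + 1) ' ']))

-- ===== PRECONDITION & SPEC =====
def Spec_supports_ssl (input : String) (out : Bool) : Prop := out = supports_ssl_alt input
instance (input : String) (out : Bool) : Decidable (Spec_supports_ssl input out) := by unfold Spec_supports_ssl; infer_instance

-- ===== CLAIM (what is proved, stated in full; the proofs are below) =====
def Claim_equal_supports_ssl : Prop := ∀ (input : String), Dom_supports_ssl input → Spec_supports_ssl input (supports_ssl input)

-- ===== LEMMAS AND PROOFS =====

def win3 (s : List Char) : List (List Char) :=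
  (List.range (s.length - 2)).map (fun i => (s.drop i).take 3)

lemma slice_window (s : List Char) (i : Nat) :
    PySem.List.slice s (some (i : Int)) (some ((i : Int) + 3)) = (s.drop i).take 3 := by
  have h := PySem.List.slice_toNat (xs := s) (a := (i : Int)) (b := (i : Int) + 3) (by positivity) (by positivity)
  rw [h]
  have h1 : ((i : Int)).toNat = i := by omega
  have h2 : ((i : Int) + 3).toNat = i + 3 := by omega
  rw [h1, h2, Nat.add_sub_cancel_left]

lemma mem_hyperTriples (hypers : List (List Char)) (x : List Char) :
    x ∈ hyperTriples hypers ↔ ∃ h ∈ hypers, x ∈ win3 h := by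
  unfold hyperTriples
  have main : ∀ (l : List (List Char)) (acc : PySem.Set (List Char)),
      x ∈ l.foldl (fun acc h => (List.range (h.length - 2)).foldl
        (fun acc2 (i : Nat) => PySem.Set.add acc2 (PySem.List.slice h (some (i : Int)) (some ((i : Int) + 3)))) acc) acc
      ↔ x ∈ acc ∨ ∃ h ∈ l, x ∈ win3 h := by
    intro l
    induction l with
    | nil => simp
    | cons h t ih =>
      intro acc
      simp only [List.foldl_cons, ih, PySem.Set.mem_foldl_add, List.mem_cons]
      unfold win3
      simp only [List.mem_map, List.mem_range, slice_window]
      constructor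
      · rintro (⟨hx | ⟨i, hi, rfl⟩⟩ | ⟨g, hg, hw⟩)
        · exact Or.inl hx
        · exact Or.inr ⟨h, Or.inl rfl, ⟨i, hi, rfl⟩⟩
        · exact Or.inr ⟨g, Or.inr hg, hw⟩
      · rintro (hx | ⟨g, (rfl | hg), hw⟩)
        · exact Or.inl (Or.inl hx)
        · obtain ⟨i, hi, rfl⟩ := hw
          exact Or.inl (Or.inr ⟨i, hi, rfl⟩)
        · exact Or.inr ⟨g, hg, hw⟩
  rw [main]
  simp [PySem.Set.empty]

lemma A_sup (g : List Char → Bool) (s : List Char) :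
    ((has_aba s).1 && ((has_aba s).2.getD []).any g)
      = (win3 s).any (fun w => is_length_3_unique_palindrome w && g w) := by
  unfold has_aba
  rcases lt_trichotomy s.length 3 with h3 | h3 | h3
  · rw [if_neg (by omega), if_neg (by omega)]
    unfold win3
    simp [show s.length - 2 = 0 by omega]
  · rw [if_pos h3]
    have hw : win3 s = [s] := by
      unfold win3
      simp [show s.length - 2 = 1 by omega, List.range_succ,
        List.take_of_length_le (le_of_eq h3)]
    simp [hw]
  · rw [if_neg (by omega), if_pos h3]
    simp only
    have hfold : ∀ (n : Nat) (init : List (List Char)),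
        (List.range n).foldl (fun acc (i : Nat) =>
          let substring := PySem.List.slice s (some (i : Int)) (some ((i : Int) + 3))
          if is_length_3_unique_palindrome substring then acc ++ [substring] else acc) init
        = init ++ ((List.range n).map (fun i => (s.drop i).take 3)).filter is_length_3_unique_palindrome := by
      intro n
      induction n with
      | zero => simp
      | succ m ih =>
        intro init
        rw [List.range_succ, List.foldl_append, ih]
        simp only [List.foldl_cons, List.foldl_nil, List.map_append, List.filter_append,
          slice_window, List.map_cons, List.map_nil]
        split <;> simp_all [List.filter]
    rw [hfold]
    simp only [List.nil_append]
    rw [show ((List.range (s.length - 2)).map (fun i => (s.drop i).take 3)) = win3 s from rfl]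
    split
    · next hpos =>
      simp only [Bool.true_and, Option.getD_some]
      rw [List.any_filter]
    · next hpos =>
      have he : (win3 s).filter is_length_3_unique_palindrome = [] :=
        List.eq_nil_of_length_eq_zero (by omega)
      rw [← List.any_filter, he]
      simp

def bab3 (w : List Char) : List Char := [w.getD 1 ' ', w.getD 0 ' ', w.getD 1 ' ']

lemma window_eq (s : List Char) (i : Nat) (h : i + 2 < s.length) :
    (s.drop i).take 3 = [s.getD i ' ', s.getD (i + 1) ' ', s.getD (i + 2) ' '] := by
  apply List.ext_getElem?
  intro n
  match n with
  | 0 => simp [List.getElem?_drop, List.getD_eq_getElem?_getD, List.getElem?_eq_getElem (by omega : i < s.length)]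
  | 1 => simp [List.getElem?_drop, List.getD_eq_getElem?_getD, List.getElem?_eq_getElem (by omega : i+1 < s.length)]
  | 2 => simp [List.getElem?_drop, List.getD_eq_getElem?_getD, List.getElem?_eq_getElem (by omega : i+2 < s.length)]
  | (n+3) => simp

lemma mem_win3_iff_infix (x h : List Char) (hx : x.length = 3) :
    x ∈ win3 h ↔ x <:+: h := by
  unfold win3
  simp only [List.mem_map, List.mem_range]
  constructor
  · rintro ⟨i, hi, rfl⟩
    exact (((h.drop i).take_prefix 3).isInfix).trans (h.drop_suffix i).isInfix
  · rintro ⟨pre, suf, rfl⟩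
    refine ⟨pre.length, by simp; omega, ?_⟩
    rw [List.append_assoc, List.drop_left' rfl,
      show (3 : Nat) = x.length from hx.symm, List.take_left]

lemma scanA_eq (hypers supers : List (List Char)) :
    ssl_loopA hypers supers =
      supers.any (fun sup => (win3 sup).any (fun w =>
        is_length_3_unique_palindrome w && hypers.any (fun h => PySem.Chars.isIn (bab3 w) h))) := by
  induction supers with
  | nil => simp [ssl_loopA]
  | cons s r ih =>
    rw [List.any_cons, ← ih,
      ← A_sup (fun aba => hypers.any (fun h => PySem.Chars.isIn (bab3 aba) h)) s]
    simp only [ssl_loopA, bab3]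
    cases hc : ((has_aba s).1 && ((has_aba s).2.getD []).any
        (fun aba => hypers.any (fun h => PySem.Chars.isIn [aba.getD 1 ' ', aba.getD 0 ' ', aba.getD 1 ' '] h))) <;> simp

lemma contains_triples (hy : List (List Char)) (a b : Char) :
    PySem.Set.contains (hyperTriples hy) [b, a, b]
      = hy.any (fun h => PySem.Chars.isIn [b, a, b] h) := by
  have hw : ∀ h : List Char, [b, a, b] ∈ win3 h ↔ [b, a, b] <:+: h :=
    fun h => mem_win3_iff_infix _ h (by simp)
  rw [Bool.eq_iff_iff]
  simp [mem_hyperTriples, hw, PySem.Chars.isIn_iff_infix,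
    List.any_eq_true]

lemma any_congr_mem {α : Type} {l : List α} {p q : α → Bool}
    (h : ∀ a ∈ l, p a = q a) : l.any p = l.any q := by
  induction l with
  | nil => rfl
  | cons x t ih =>
    simp only [List.any_cons, h x (by simp), ih (fun a ha => h a (by simp [ha]))]

lemma scanB_eq (hypers supers : List (List Char)) :
    supers.any (fun s =>
      (List.range (s.length - 2)).any (fun i =>
        s.getD i ' ' == s.getD (i + 2) ' ' && !(s.getD i ' ' == s.getD (i + 1) ' ') &&
        PySem.Set.contains (hyperTriples hypers) [s.getD (i + 1) ' ', s.getD i ' ', s.getD (i + 1) ' ']))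
    = supers.any (fun sup => (win3 sup).any (fun w =>
        is_length_3_unique_palindrome w && hypers.any (fun h => PySem.Chars.isIn (bab3 w) h))) := by
  apply any_congr_mem
  intro s _
  unfold win3
  rw [List.any_map]
  apply any_congr_mem
  intro i hmem
  have hi : i < s.length - 2 := List.mem_range.mp hmem
  have h2 : i + 2 < s.length := by omega
  simp only [Function.comp, window_eq s i h2, is_length_3_unique_palindrome, bab3,
    contains_triples, List.getElem?_cons_zero, List.getElem?_cons_succ, List.getD_cons_zero,
    List.getD_cons_succ]
  simp [Bool.and_assoc]

-- ===== VERDICT (by name: the statement is the Claim_ definition above) =====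
theorem supports_ssl_spec : Claim_equal_supports_ssl := by
  intro input _
  unfold Spec_supports_ssl supports_ssl supports_ssl_alt
  simp only []
  rw [scanA_eq, scanB_eq]
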